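-- pv_equiv track=rewrite | github.com/maikupero/fatpad | practice/interview_prep/problems/contacts.py | contacts
-- ===== SOURCE A (Python) =====
-- def contacts(queries):
--     res = []
--     names = set()
--
--     for (i, query) in enumerate(queries):
--         command = query[0]
--         textQuery = query[1]
--         if command == 'add':
--             names.add(textQuery)
--         elif command == 'find':
--             count = 0
--             for name in names:
--                 if name.startswith(textQuery):
--                     count += 1
--             res.append(count)
--
--     return res
-- ===== SOURCE B (Python) =====
-- def contacts(queries):
--     res = []
--     seen = set()
--     counts = {}
--     for query in queries:
--         command = query[0]
--         text = query[1]
--         if command == 'add':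
--             if text not in seen:
--                 seen.add(text)
--                 for p in [text[:i] for i in range(len(text) + 1)]:
--                     counts[p] = counts.get(p, 0) + 1
--         elif command == 'find':
--             res.append(counts.get(text, 0))
--     return res
-- ===== Notes on version B (the rewrite author's own statement) =====
-- stated objective: alternative
-- what changed: Instead of scanning every stored name per 'find', B maintains a dictionary counting each prefix of every distinct added name once, so a 'find' is a single dictionary lookup; a timing run read only 1.25x at the largest size, so no speed is claimed.
import Mathlib
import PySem

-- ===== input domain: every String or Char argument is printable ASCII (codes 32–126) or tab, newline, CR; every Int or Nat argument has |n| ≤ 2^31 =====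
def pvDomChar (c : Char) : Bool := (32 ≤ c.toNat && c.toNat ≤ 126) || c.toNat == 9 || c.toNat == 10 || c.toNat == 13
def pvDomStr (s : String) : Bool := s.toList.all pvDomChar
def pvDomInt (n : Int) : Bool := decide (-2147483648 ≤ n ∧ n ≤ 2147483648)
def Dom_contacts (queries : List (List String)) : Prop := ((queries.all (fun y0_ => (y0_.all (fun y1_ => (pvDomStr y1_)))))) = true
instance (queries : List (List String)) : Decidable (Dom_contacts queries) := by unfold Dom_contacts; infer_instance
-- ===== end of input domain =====

-- B replaces A's per-'find' scan over all stored names by a dictionary that counts every prefix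
-- of each distinct added name once, so each 'find' is a single lookup (alternative algorithm).


-- ===== PORT A =====
-- one loop iteration of A: state = (res, names)
def contactsStepA (st : List Int × PySem.Set String) (query : List String) :
    List Int × PySem.Set String :=
  let command := PySem.List.pyGetD query 0 ""
  let textQuery := PySem.List.pyGetD query 1 ""
  if command = "add" then (st.1, PySem.Set.add st.2 textQuery)
  else if command = "find" then
    (st.1 ++ [st.2.foldl (fun count name =>
        if PySem.Str.startswith name textQuery then count + 1 else count) (0 : Int)], st.2)
  else st

def contacts (queries : List (List String)) : List Int :=
  (queries.foldl contactsStepA ([], PySem.Set.empty)).1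

-- ===== PORT B =====
-- one loop iteration of B: state = (res, seen, prefix-count dict)
def contactsStepB (st : List Int × PySem.Set String × PySem.Dict String Int)
    (query : List String) : List Int × PySem.Set String × PySem.Dict String Int :=
  let command := PySem.List.pyGetD query 0 ""
  let text := PySem.List.pyGetD query 1 ""
  if command = "add" then
    if PySem.Set.contains st.2.1 text then st
    else (st.1, PySem.Set.add st.2.1 text,
      ((PySem.List.pyRange 0 (PySem.Str.len text + 1)).map
          (fun i => PySem.Str.slice text none (some i))).foldl
        (fun d p => d.modify p 0 (· + 1)) st.2.2)
  else if command = "find" then (st.1 ++ [st.2.2.getD text 0], st.2.1, st.2.2)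
  else st

def contacts_alt (queries : List (List String)) : List Int :=
  (queries.foldl contactsStepB ([], PySem.Set.empty, PySem.Dict.empty)).1

-- ===== PRECONDITION & SPEC =====
-- Pre_ excludes exactly the queries with fewer than two entries, on which the Python A
-- (and B) raise IndexError at query[0]/query[1].
def Pre_contacts (queries : List (List String)) : Prop :=
  ∀ q ∈ queries, 2 ≤ q.length
instance (queries : List (List String)) : Decidable (Pre_contacts queries) := by
  unfold Pre_contacts; infer_instance

def pvWitness_contacts : List (List String) :=
  [["add", "ab"], ["add", "ab"], ["add", "ac"], ["find", "a"], ["find", "ab"], ["find", ""]]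

def Spec_contacts (queries : List (List String)) (out : List Int) : Prop := out = contacts_alt queries
instance (queries : List (List String)) (out : List Int) : Decidable (Spec_contacts queries out) := by unfold Spec_contacts; infer_instance

-- ===== CLAIM (what is proved, stated in full; the proofs are below) =====
def Claim_equal_contacts : Prop := ∀ (queries : List (List String)), Dom_contacts queries → Pre_contacts queries → Spec_contacts queries (contacts queries)

-- ===== LEMMAS AND PROOFS =====

-- the list of all prefixes of t (what B's inner loop iterates over)
def prefsOf (t : String) : List String :=
  (PySem.List.pyRange 0 (PySem.Str.len t + 1)).map (fun i => PySem.Str.slice t none (some i))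

lemma prefsOf_eq (t : String) :
    prefsOf t = (List.range (t.toList.length + 1)).map
      (fun (k : Nat) => PySem.Str.slice t none (some (k : Int))) := by
  unfold prefsOf
  rw [PySem.Str.len_eq, show ((t.toList.length : Int) + 1) = ((t.toList.length + 1 : Nat) : Int) by push_cast; ring,
    PySem.List.pyRange_zero_natCast, List.map_map]
  rfl

lemma toList_slice_nat (t : String) (k : Nat) :
    (PySem.Str.slice t none (some (k : Int))).toList = t.toList.take k := by
  rw [PySem.Str.toList_slice, PySem.Chars.slice_eq_listSlice, PySem.List.slice_to_natCast]

lemma mem_prefsOf (t p : String) :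
    p ∈ prefsOf t ↔ PySem.Str.startswith t p = true := by
  rw [prefsOf_eq, PySem.Str.startswith_eq, PySem.Chars.startswith_iff, List.mem_map]
  constructor
  · rintro ⟨k, _, rfl⟩
    rw [toList_slice_nat]
    exact List.take_prefix k t.toList
  · intro h
    refine ⟨p.toList.length, ?_, ?_⟩
    · simp only [List.mem_range]
      have := h.length_le
      omega
    · apply String.toList_inj.mp
      rw [toList_slice_nat]
      exact (List.prefix_iff_eq_take.mp h).symm

lemma nodup_prefsOf (t : String) : (prefsOf t).Nodup := by
  rw [prefsOf_eq]
  refine List.Nodup.map_on ?_ List.nodup_range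
  intro x hx y hy hxy
  simp only [List.mem_range] at hx hy
  have hx' : (PySem.Str.slice t none (some (x : Int))).toList.length = x := by
    rw [toList_slice_nat, List.length_take]; omega
  have hy' : (PySem.Str.slice t none (some (y : Int))).toList.length = y := by
    rw [toList_slice_nat, List.length_take]; omega
  rw [← hx', ← hy', hxy]

lemma count_prefsOf (t p : String) :
    (prefsOf t).count p = if PySem.Str.startswith t p then 1 else 0 := by
  simp [List.Nodup.count (nodup_prefsOf t), mem_prefsOf]

-- the dictionary invariant: pc counts, for each prefix p, how many stored names start with p
def DictInv (names : PySem.Set String) (pc : PySem.Dict String Int) : Prop :=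
  ∀ p : String, pc.getD p 0 = (List.countP (fun n => PySem.Str.startswith n p) names : Int)

lemma dictInv_add (names : PySem.Set String) (pc : PySem.Dict String Int) (t : String)
    (hinv : DictInv names pc) :
    DictInv (names ++ [t]) ((prefsOf t).foldl (fun d p => d.modify p 0 (· + 1)) pc) := by
  intro p
  rw [PySem.Dict.getD_foldl_modify_add_one, hinv p, count_prefsOf, List.countP_append]
  simp only [List.countP_cons, List.countP_nil]
  split_ifs with h
  · simp
  · simp [h]

lemma foldl_eq (qs : List (List String)) :
    ∀ (res : List Int) (names : PySem.Set String) (pc : PySem.Dict String Int),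
      DictInv names pc →
      (qs.foldl contactsStepA (res, names)).1 =
        (qs.foldl contactsStepB (res, names, pc)).1 := by
  induction qs with
  | nil => intro res names pc _; rfl
  | cons q qs ih =>
    intro res names pc hinv
    simp only [List.foldl_cons]
    by_cases hadd : PySem.List.pyGetD q 0 "" = "add"
    · by_cases hmem : PySem.Set.contains names (PySem.List.pyGetD q 1 "") = true
      · have hIn : (PySem.List.pyGetD q 1 "") ∈ names := by simpa using hmem
        have hA : contactsStepA (res, names) q = (res, names) := by
          simp [contactsStepA, hadd, PySem.Set.add, hIn]
        have hB : contactsStepB (res, names, pc) q = (res, names, pc) := by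
          simp [contactsStepB, hadd, hIn]
        rw [hA, hB]
        exact ih res names pc hinv
      · have hNotIn : (PySem.List.pyGetD q 1 "") ∉ names := by simpa using hmem
        have hA : contactsStepA (res, names) q
            = (res, names ++ [PySem.List.pyGetD q 1 ""]) := by
          simp [contactsStepA, hadd, PySem.Set.add, hNotIn]
        have hB : contactsStepB (res, names, pc) q
            = (res, names ++ [PySem.List.pyGetD q 1 ""],
               (prefsOf (PySem.List.pyGetD q 1 "")).foldl
                 (fun d p => d.modify p 0 (· + 1)) pc) := by
          simp [contactsStepB, hadd, prefsOf, PySem.Set.add, hNotIn]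
        rw [hA, hB]
        exact ih res (names ++ [PySem.List.pyGetD q 1 ""]) _
          (dictInv_add names pc (PySem.List.pyGetD q 1 "") hinv)
    · by_cases hfind : PySem.List.pyGetD q 0 "" = "find"
      · have hcnt : names.foldl (fun count name =>
            if PySem.Str.startswith name (PySem.List.pyGetD q 1 "") then count + 1 else count)
            (0 : Int)
            = PySem.Dict.getD pc (PySem.List.pyGetD q 1 "") 0 := by
          rw [PySem.List.foldl_count_if
            (fun name => PySem.Str.startswith name (PySem.List.pyGetD q 1 "")) names 0,
            hinv (PySem.List.pyGetD q 1 "")]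
          simp
        have hA : contactsStepA (res, names) q
            = (res ++ [PySem.Dict.getD pc (PySem.List.pyGetD q 1 "") 0], names) := by
          simp [contactsStepA, hfind, ← hcnt]
        have hB : contactsStepB (res, names, pc) q
            = (res ++ [PySem.Dict.getD pc (PySem.List.pyGetD q 1 "") 0], names, pc) := by
          simp [contactsStepB, hfind]
        rw [hA, hB]
        exact ih _ names pc hinv
      · have hA : contactsStepA (res, names) q = (res, names) := by
          simp [contactsStepA, hadd, hfind]
        have hB : contactsStepB (res, names, pc) q = (res, names, pc) := by
          simp [contactsStepB, hadd, hfind]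
        rw [hA, hB]
        exact ih res names pc hinv

-- ===== VERDICT (by name: the statement is the Claim_ definition above) =====
theorem contacts_spec : Claim_equal_contacts := by
  intro queries _ _
  unfold Spec_contacts contacts contacts_alt
  exact foldl_eq queries [] PySem.Set.empty PySem.Dict.empty
    (fun p => by simp [PySem.Dict.getD_empty, PySem.Set.empty])
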